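-- pv_equiv track=rewrite | github.com/mokuno3430/a-liner | a_liner/genes.py | func_get_gene_name_from_gff
-- ===== SOURCE A (Python) =====
-- def func_get_gene_name_from_gff( attributes, gene_label_attr ):
--     gene_name = ''
--     for attr in attributes.split(';'):
--         if '=' in attr:
--             key, value = attr.split('=', 1)
--             if key == gene_label_attr:
--                 gene_name = value
--                 break
--     return gene_name
-- ===== SOURCE B (Python) =====
-- def func_get_gene_name_from_gff(attributes, gene_label_attr):
--     table = {}
--     for attr in attributes.split(';'):
--         if '=' in attr:
--             key, value = attr.split('=', 1)
--             table.setdefault(key, value)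
--     return table.get(gene_label_attr, '')
-- ===== Notes on version B (the rewrite author's own statement) =====
-- stated objective: idiomatic
-- what changed: B builds a full key->value table (first occurrence kept via setdefault) from all attributes and finishes with one dict lookup, instead of A's early-exit linear scan that compares each key against the label.
import Mathlib
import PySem

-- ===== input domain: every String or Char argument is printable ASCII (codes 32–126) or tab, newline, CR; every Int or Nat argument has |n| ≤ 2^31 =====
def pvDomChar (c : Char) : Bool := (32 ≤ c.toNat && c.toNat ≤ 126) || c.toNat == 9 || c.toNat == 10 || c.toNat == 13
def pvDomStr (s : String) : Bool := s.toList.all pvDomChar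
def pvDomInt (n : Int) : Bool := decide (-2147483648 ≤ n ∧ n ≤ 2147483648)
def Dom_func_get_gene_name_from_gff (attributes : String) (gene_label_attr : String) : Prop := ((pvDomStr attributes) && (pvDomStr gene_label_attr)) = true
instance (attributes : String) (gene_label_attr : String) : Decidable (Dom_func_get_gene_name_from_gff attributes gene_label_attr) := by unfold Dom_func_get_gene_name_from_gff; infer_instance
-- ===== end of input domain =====

-- B replaces A's early-exit scan by a setdefault-built lookup table plus one final get (idiomatic).

-- ===== PORT A =====
-- A's loop with break: structural recursion over the ';'-pieces, returning '' if no match.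
def pvGoA : List String → String → String
  | [], _ => ""
  | attr :: rest, lbl =>
    if PySem.Str.isIn "=" attr then
      let parts := (PySem.Str.splitMax? attr "=" 1).getD []
      let key := parts.getD 0 ""
      let value := parts.getD 1 ""
      if key = lbl then value else pvGoA rest lbl
    else pvGoA rest lbl

def func_get_gene_name_from_gff (attributes : String) (gene_label_attr : String) : String :=
  pvGoA ((PySem.Str.split? attributes ";").getD []) gene_label_attr

-- ===== PORT B =====
def pvStepB (d : PySem.Dict String String) (attr : String) : PySem.Dict String String :=
  if PySem.Str.isIn "=" attr then
    let parts := (PySem.Str.splitMax? attr "=" 1).getD []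
    d.setdefault (parts.getD 0 "") (parts.getD 1 "")
  else d

def func_get_gene_name_from_gff_alt (attributes : String) (gene_label_attr : String) : String :=
  (((PySem.Str.split? attributes ";").getD []).foldl pvStepB PySem.Dict.empty).getD gene_label_attr ""

-- ===== PRECONDITION & SPEC =====
def Spec_func_get_gene_name_from_gff (attributes : String) (gene_label_attr : String) (out : String) : Prop := out = func_get_gene_name_from_gff_alt attributes gene_label_attr
instance (attributes : String) (gene_label_attr : String) (out : String) : Decidable (Spec_func_get_gene_name_from_gff attributes gene_label_attr out) := by unfold Spec_func_get_gene_name_from_gff; infer_instance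

-- ===== CLAIM (what is proved, stated in full; the proofs are below) =====
def Claim_equal_func_get_gene_name_from_gff : Prop := ∀ (attributes : String) (gene_label_attr : String), Dom_func_get_gene_name_from_gff attributes gene_label_attr → Spec_func_get_gene_name_from_gff attributes gene_label_attr (func_get_gene_name_from_gff attributes gene_label_attr)

-- ===== LEMMAS AND PROOFS =====
-- Invariant: the table built from d answers lbl with d's value if d already has lbl,
-- otherwise with A's first-match scan over the remaining pieces.
theorem pvFold_invariant (pieces : List String) (d : PySem.Dict String String) (lbl : String) :
    (pieces.foldl pvStepB d).getD lbl "" =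
      match d.get? lbl with
      | some v => v
      | none => pvGoA pieces lbl := by
  induction pieces generalizing d with
  | nil =>
    simp [pvGoA, PySem.Dict.getD_eq_get?_getD]
    cases d.get? lbl <;> rfl
  | cons attr rest ih =>
    rw [List.foldl_cons, ih]
    by_cases hin : PySem.Str.isIn "=" attr = true
    · simp only [pvStepB, pvGoA, hin, if_pos]
      set parts := (PySem.Str.splitMax? attr "=" 1).getD [] with hp
      by_cases hk : parts.getD 0 "" = lbl
      · subst hk
        rw [PySem.Dict.get?_setdefault_self]
        cases h : d.get? (parts.getD 0 "") <;> simp [h]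
      · rw [PySem.Dict.get?_setdefault_of_ne _ _ (Ne.symm hk)]
        cases h : d.get? lbl
        · rw [if_neg hk]
        · rfl
    · simp only [pvStepB, pvGoA, hin, if_neg, Bool.false_eq_true, not_false_iff]

-- ===== VERDICT (by name: the statement is the Claim_ definition above) =====
theorem func_get_gene_name_from_gff_spec : Claim_equal_func_get_gene_name_from_gff := by
  intro attributes gene_label_attr _
  unfold Spec_func_get_gene_name_from_gff func_get_gene_name_from_gff func_get_gene_name_from_gff_alt
  rw [pvFold_invariant]
  simp [PySem.Dict.get?_empty]
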